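-- pv_equiv track=rewrite | github.com/Anson-Saju-George/dsx86 | Infosys_Prep/Trees_Graphs/001_subtree_aggregation.py | subtree_sum
-- ===== SOURCE A (Python) =====
-- def subtree_sum(n, par, val):
--     tree = [[] for _ in range(n+1)]
--     for i in range(2, n+1):
--         tree[par[i]].append(i)
--
--     res = [0]*(n+1)
--
--     def dfs(u):
--         s = val[u]
--         for v in tree[u]:
--             s += dfs(v)
--         res[u] = s
--         return s
--
--     dfs(1)
--     return res[1:]
-- ===== SOURCE B (Python) =====
-- def subtree_sum(n, par, val):
--     children = [[] for _ in range(n + 1)]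
--     for i in range(2, n + 1):
--         children[par[i]].append(i)
--
--     # iterative DFS from the root: every node comes after its parent in `order`
--     order = []
--     stack = [1]
--     while stack:
--         u = stack.pop()
--         order.append(u)
--         stack.extend(children[u])
--
--     # accumulate subtree sums bottom-up (children before parents)
--     res = [0] * (n + 1)
--     for u in reversed(order):
--         res[u] = val[u] + sum(res[c] for c in children[u])
--     return res[1:]
-- ===== Notes on version B (the rewrite author's own statement) =====
-- stated objective: alternative
-- what changed: Replaces A's recursive DFS by an iterative stack DFS that records a parent-before-child order and then accumulates subtree sums bottom-up over that order in reverse; no recursion.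
-- outside the precondition, e.g. on subtree_sum(2, [0, 0, 2], [0, 9]): A returns [9, 0], B returns [9, 0]
import Mathlib
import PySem

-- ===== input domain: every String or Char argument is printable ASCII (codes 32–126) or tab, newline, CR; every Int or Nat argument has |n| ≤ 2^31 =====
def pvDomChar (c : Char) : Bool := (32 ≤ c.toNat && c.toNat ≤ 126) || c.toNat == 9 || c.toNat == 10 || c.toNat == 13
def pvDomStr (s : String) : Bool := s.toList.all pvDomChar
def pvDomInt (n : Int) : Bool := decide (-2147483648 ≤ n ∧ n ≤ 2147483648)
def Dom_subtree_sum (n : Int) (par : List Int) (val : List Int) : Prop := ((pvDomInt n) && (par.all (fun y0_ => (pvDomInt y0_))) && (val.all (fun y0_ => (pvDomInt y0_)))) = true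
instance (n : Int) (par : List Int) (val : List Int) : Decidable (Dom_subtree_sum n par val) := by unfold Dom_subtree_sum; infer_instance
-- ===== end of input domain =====

-- B replaces A's recursive DFS by an iterative stack DFS that records a parent-before-child
-- order and then accumulates subtree sums bottom-up over that order in reverse (alternative
-- decomposition, same results); neither version mutates its arguments.

-- ===== PORT A =====
-- dfs / the loop over children, mutually recursive, with a fuel guard for totality
-- (Python's recursion is finite on every input Pre_ admits; fuel n+1 is proved sufficient below).
mutual
def dfsA (tree : List (List Int)) (val : List Int) : Nat → Int → List Int → Option (List Int × Int)
  | 0, _, _ => none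
  | fuel+1, u, res =>
    match PySem.List.pyGet? val u with
    | none => none
    | some s0 =>
      match PySem.List.pyGet? tree u with
      | none => none
      | some ch =>
        match dfsChildren tree val fuel ch res s0 with
        | none => none
        | some (res1, s) =>
          match PySem.List.pySet? res1 u s with
          | none => none
          | some res2 => some (res2, s)
termination_by fuel _ _ => (fuel, 0)

def dfsChildren (tree : List (List Int)) (val : List Int) : Nat → List Int → List Int → Int → Option (List Int × Int)
  | _, [], res, s => some (res, s)
  | fuel, v :: vs, res, s =>
    match dfsA tree val fuel v res with
    | none => none
    | some (res1, sv) => dfsChildren tree val fuel vs res1 (s + sv)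
termination_by fuel l _ _ => (fuel, l.length + 1)
end

-- body of A's tree-building loop: tree[par[i]].append(i)
def buildStep (par : List Int) (tree : List (List Int)) (i : Int) : Option (List (List Int)) :=
  match PySem.List.pyGet? par i with
  | none => none
  | some p =>
    match PySem.List.pyGet? tree p with
    | none => none
    | some cur => PySem.List.pySet? tree p (cur ++ [i])

def subtree_sum (n : Int) (par : List Int) (val : List Int) : List Int :=
  match (PySem.List.pyRange 2 (n+1) 1).foldlM (buildStep par) (List.replicate (n+1).toNat []) with
  | none => []
  | some tree =>
    match dfsA tree val (n.toNat + 1) 1 (List.replicate (n+1).toNat 0) with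
    | none => []
    | some (res, _) => PySem.List.slice res (some 1) none

-- ===== PORT B =====
-- Source B's tree-building loop is the same statement 'children[par[i]].append(i)', so its
-- body is the same helper buildStep.
-- 'while stack: u = stack.pop(); order.append(u); stack.extend(children[u])'
-- (fuel makes the while loop total; n+1 iterations are proved sufficient under Pre_).
def stackLoop (tree : List (List Int)) : Nat → List Int → List Int → Option (List Int)
  | 0, _, _ => none
  | fuel+1, stack, order =>
    match PySem.List.pop? stack with
    | none => some order
    | some (u, stack') =>
      match PySem.List.pyGet? tree u with
      | none => none
      | some ch => stackLoop tree fuel (stack' ++ ch) (order ++ [u])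

-- 'sum(res[c] for c in children[u])'
def childSum (res : List Int) (cs : List Int) : Option Int :=
  cs.foldlM (fun s c => (PySem.List.pyGet? res c).map (fun x => s + x)) 0

-- body of 'for u in reversed(order): res[u] = val[u] + sum(res[c] for c in children[u])'
def accStep (tree : List (List Int)) (val : List Int) (res : List Int) (u : Int) : Option (List Int) :=
  match PySem.List.pyGet? val u with
  | none => none
  | some x =>
    match PySem.List.pyGet? tree u with
    | none => none
    | some ch =>
      match childSum res ch with
      | none => none
      | some s => PySem.List.pySet? res u (x + s)

def subtree_sum_alt (n : Int) (par : List Int) (val : List Int) : List Int :=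
  match (PySem.List.pyRange 2 (n+1) 1).foldlM (buildStep par) (List.replicate (n+1).toNat []) with
  | none => []
  | some children =>
    match stackLoop children (n.toNat + 1) [1] [] with
    | none => []
    | some order =>
      match order.reverse.foldlM (accStep children val) (List.replicate (n+1).toNat 0) with
      | none => []
      | some res => PySem.List.slice res (some 1) none

-- ===== PRECONDITION & SPEC =====
-- A raises IndexError when n < 1 (res[1] = s), when par misses an index in 2..n, when a
-- parent entry is outside [-(n+1), n], or when val[u] is missing for a visited node u.
-- Pre_ states the last as 'val covers 0..n'; this is slightly narrower than A's domain:
-- A also returns when the indices missing from val belong to nodes unreachable from the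
-- root — B agrees with A on such excluded inputs (see the cited example).
def Pre_subtree_sum (n : Int) (par : List Int) (val : List Int) : Prop :=
  1 ≤ n ∧ (2 ≤ n → n + 1 ≤ (par.length : Int)) ∧ n + 1 ≤ (val.length : Int) ∧
  ∀ i ∈ PySem.List.pyRange 2 (n+1) 1,
    -(n+1) ≤ PySem.List.pyGetD par i 0 ∧ PySem.List.pyGetD par i 0 ≤ n
instance (n : Int) (par : List Int) (val : List Int) : Decidable (Pre_subtree_sum n par val) := by
  unfold Pre_subtree_sum; infer_instance

def pvWitness_subtree_sum : Int × List Int × List Int := (3, [0, 0, 1, 1], [0, 5, 7, -2])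

def Spec_subtree_sum (n : Int) (par : List Int) (val : List Int) (out : List Int) : Prop :=
  out = subtree_sum_alt n par val
instance (n : Int) (par : List Int) (val : List Int) (out : List Int) : Decidable (Spec_subtree_sum n par val out) := by
  unfold Spec_subtree_sum; infer_instance

-- ===== CLAIM (what is proved, stated in full; the proofs are below) =====
def Claim_equal_subtree_sum : Prop := ∀ (n : Int) (par : List Int) (val : List Int), Dom_subtree_sum n par val → Pre_subtree_sum n par val → Spec_subtree_sum n par val (subtree_sum n par val)


-- ===== LEMMAS AND PROOFS =====

-- normalized parent pointer of node w (Python's tree[par[w]] index normalization = par[w] mod (n+1))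
def gstep (n : Int) (par : List Int) (w : Int) : Int :=
  PySem.Int.mod (PySem.List.pyGetD par w 0) (n+1)

-- pathB k u: following parent pointers from u stays in [2..n] for k steps and then hits 1
def pathB (n : Int) (par : List Int) : Nat → Int → Bool
  | 0, u => u == 1
  | k+1, u => decide (2 ≤ u) && decide (u ≤ n) && pathB n par k (gstep n par u)

-- the chain [u, g u, g (g u), …] of length k+1
def pl (n : Int) (par : List Int) : Nat → Int → List Int
  | 0, u => [u]
  | k+1, u => u :: pl n par k (gstep n par u)

def orb (n : Int) (par : List Int) : Nat → Int → Int
  | 0, u => u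
  | k+1, u => orb n par k (gstep n par u)

def reachb (n : Int) (par : List Int) (u : Int) : Bool :=
  (List.range (n.toNat + 1)).any (fun k => pathB n par k u)

def depf (n : Int) (par : List Int) (u : Int) : Nat :=
  (List.range (n.toNat + 1)).findIdx (fun k => pathB n par k u)

def chn (n : Int) (par : List Int) (u : Int) : List Int := pl n par (depf n par u) u

def contrib (n : Int) (par val : List Int) (u j : Int) : Int :=
  if reachb n par u && (chn n par u).contains j then PySem.List.pyGetD val u 0 else 0

-- subtree sum at j: total of val over the nodes whose root-chain passes through j
def Tsum (n : Int) (par val : List Int) (j : Int) : Int :=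
  ((PySem.List.pyRange 1 (n+1) 1).map (fun u => contrib n par val u j)).sum

def childrenL (n : Int) (par : List Int) (u : Int) : List Int :=
  (PySem.List.pyRange 2 (n+1) 1).filter (fun i => decide (gstep n par i = u))

-- the reachable nodes
def Rlist (n : Int) (par : List Int) : List Int :=
  (PySem.List.pyRange 1 (n+1) 1).filter (fun j => reachb n par j)

-- ---- context extracted from Pre_ ----
def Ctx (n : Int) (par : List Int) : Prop :=
  1 ≤ n ∧ ∀ w : Int, 2 ≤ w → w ≤ n →
    PySem.List.pyGet? par w = some (PySem.List.pyGetD par w 0) ∧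
    -(n+1) ≤ PySem.List.pyGetD par w 0 ∧ PySem.List.pyGetD par w 0 ≤ n

theorem ctx_of_pre (n : Int) (par : List Int) (val : List Int)
    (h : Pre_subtree_sum n par val) : Ctx n par := by
  obtain ⟨hn, hp, hv, hb⟩ := h
  refine ⟨hn, fun w h2 hw => ?_⟩
  have hlen : w < (par.length : Int) := by
    have := hp (by omega); omega
  have h0 : (0:Int) ≤ w := by omega
  have hg : PySem.List.pyGet? par w = some (par[w.toNat]'(by omega)) :=
    PySem.List.pyGet?_eq_some_getElem par h0 hlen
  have hd : PySem.List.pyGetD par w 0 = par[w.toNat]'(by omega) :=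
    PySem.List.pyGetD_eq_getElem par 0 h0 hlen
  have hmem : w ∈ PySem.List.pyRange 2 (n+1) 1 := by
    rw [PySem.List.mem_pyRange_one]; omega
  have := hb w hmem
  exact ⟨by rw [hg, hd], this.1, this.2⟩

theorem orb_zero (n : Int) (par : List Int) (u : Int) : orb n par 0 u = u := rfl

theorem orb_succ (n : Int) (par : List Int) (k : Nat) (u : Int) :
    orb n par (k+1) u = orb n par k (gstep n par u) := rfl

theorem orb_add (n : Int) (par : List Int) (a b : Nat) (u : Int) :
    orb n par a (orb n par b u) = orb n par (a + b) u := by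
  induction b generalizing u with
  | zero => rfl
  | succ b ih => rw [orb_succ, ih]; rfl

theorem pathB_orb (n : Int) (par : List Int) (k : Nat) (u : Int)
    (h : pathB n par k u = true) :
    (∀ i < k, 2 ≤ orb n par i u ∧ orb n par i u ≤ n) ∧ orb n par k u = 1 := by
  induction k generalizing u with
  | zero =>
    simp only [pathB] at h
    exact ⟨by omega, by simpa [orb_zero] using h⟩
  | succ k ih =>
    simp only [pathB, Bool.and_eq_true, decide_eq_true_eq] at h
    obtain ⟨⟨h2, hn⟩, hp⟩ := h
    obtain ⟨hall, hlast⟩ := ih (gstep n par u) hp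
    refine ⟨fun i hi => ?_, by rw [orb_succ]; exact hlast⟩
    cases i with
    | zero => exact ⟨h2, hn⟩
    | succ i => rw [orb_succ]; exact hall i (by omega)

theorem pathB_shift (n : Int) (par : List Int) (k i : Nat) (u : Int)
    (h : pathB n par k u = true) (hi : i ≤ k) :
    pathB n par (k - i) (orb n par i u) = true := by
  induction i generalizing u k with
  | zero => simpa [orb_zero] using h
  | succ i ih =>
    cases k with
    | zero => omega
    | succ k =>
      simp only [pathB, Bool.and_eq_true] at h
      have := ih k (gstep n par u) h.2 (by omega)
      simpa [orb_succ, Nat.succ_sub_succ] using this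

theorem pathB_unique (n : Int) (par : List Int) (k k' : Nat) (u : Int)
    (h : pathB n par k u = true) (h' : pathB n par k' u = true) : k = k' := by
  by_contra hne
  rcases Nat.lt_or_ge k k' with hlt | hge
  · have h1 : orb n par k u = 1 := (pathB_orb n par k u h).2
    have h2 := (pathB_orb n par k' u h').1 k hlt
    omega
  · have hlt : k' < k := by omega
    have h1 : orb n par k' u = 1 := (pathB_orb n par k' u h').2
    have h2 := (pathB_orb n par k u h).1 k' hlt
    omega

-- ---- pl (chain list) basics ----
theorem pl_eq_map (n : Int) (par : List Int) (k : Nat) (u : Int) :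
    pl n par k u = (List.range (k+1)).map (fun i => orb n par i u) := by
  induction k generalizing u with
  | zero => rfl
  | succ k ih =>
    rw [List.range_succ_eq_map]
    simp only [pl, ih, List.map_cons, List.map_map]
    congr 1

theorem pl_length (n : Int) (par : List Int) (k : Nat) (u : Int) :
    (pl n par k u).length = k + 1 := by simp [pl_eq_map]

theorem mem_pl (n : Int) (par : List Int) (k : Nat) (u x : Int) :
    x ∈ pl n par k u ↔ ∃ i, i ≤ k ∧ orb n par i u = x := by
  simp only [pl_eq_map, List.mem_map, List.mem_range]
  constructor
  · rintro ⟨i, hi, rfl⟩; exact ⟨i, by omega, rfl⟩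
  · rintro ⟨i, hi, rfl⟩; exact ⟨i, by omega, rfl⟩

theorem self_mem_pl (n : Int) (par : List Int) (k : Nat) (u : Int) :
    u ∈ pl n par k u := (mem_pl n par k u u).2 ⟨0, by omega, rfl⟩

theorem one_mem_pl (n : Int) (par : List Int) (k : Nat) (u : Int)
    (h : pathB n par k u = true) : (1:Int) ∈ pl n par k u :=
  (mem_pl n par k u 1).2 ⟨k, le_refl _, (pathB_orb n par k u h).2⟩

theorem pl_nodup (n : Int) (par : List Int) (k : Nat) (u : Int)
    (h : pathB n par k u = true) : (pl n par k u).Nodup := by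
  rw [pl_eq_map]
  refine List.Nodup.map_on ?_ (List.nodup_range)
  intro i hi j hj hij
  simp only [List.mem_range] at hi hj
  by_contra hne
  rcases Nat.lt_or_ge i j with hlt | hge
  · have h1 : orb n par (k - j + i) u = 1 := by
      have : orb n par (k - j) (orb n par j u) = 1 := by
        rw [orb_add]
        rw [Nat.sub_add_cancel (by omega)]
        exact (pathB_orb n par k u h).2
      rw [← hij, orb_add] at this
      exact this
    have h2 := (pathB_orb n par k u h).1 (k - j + i) (by omega)
    omega
  · have hlt : j < i := by omega
    have h1 : orb n par (k - i + j) u = 1 := by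
      have : orb n par (k - i) (orb n par i u) = 1 := by
        rw [orb_add, Nat.sub_add_cancel (by omega)]
        exact (pathB_orb n par k u h).2
      rw [hij, orb_add] at this
      exact this
    have h2 := (pathB_orb n par k u h).1 (k - i + j) (by omega)
    omega

theorem pl_subset_range (n : Int) (par : List Int) (k : Nat) (u : Int)
    (hn : 1 ≤ n) (h : pathB n par k u = true) :
    pl n par k u ⊆ PySem.List.pyRange 1 (n+1) 1 := by
  intro x hx
  rw [PySem.List.mem_pyRange_one]
  obtain ⟨i, hik, rfl⟩ := (mem_pl n par k u x).1 hx
  rcases Nat.lt_or_ge i k with hlt | hge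
  · have := (pathB_orb n par k u h).1 i hlt; omega
  · have hik' : i = k := by omega
    rw [hik']
    have := (pathB_orb n par k u h).2; omega

theorem path_card (n : Int) (par : List Int) (k : Nat) (u : Int)
    (hn : 1 ≤ n) (h : pathB n par k u = true) : k + 1 ≤ n.toNat := by
  have hsub := pl_subset_range n par k u hn h
  have hnd := pl_nodup n par k u h
  have := (List.subperm_of_subset hnd hsub).length_le
  rw [pl_length] at this
  rw [PySem.List.length_pyRange_one] at this
  omega

-- ---- reachb / depf / chn ----
theorem reachb_iff (n : Int) (par : List Int) (u : Int) (hn : 1 ≤ n) :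
    reachb n par u = true ↔ ∃ k, pathB n par k u = true := by
  unfold reachb
  rw [List.any_eq_true]
  constructor
  · rintro ⟨k, _, hk⟩; exact ⟨k, hk⟩
  · rintro ⟨k, hk⟩
    exact ⟨k, List.mem_range.2 (by have := path_card n par k u hn hk; omega), hk⟩

theorem depf_eq (n : Int) (par : List Int) (u : Int) (k : Nat) (hn : 1 ≤ n)
    (h : pathB n par k u = true) : depf n par u = k := by
  unfold depf
  have hmem : k ∈ List.range (n.toNat + 1) :=
    List.mem_range.2 (by have := path_card n par k u hn h; omega)
  have hex : ∃ x ∈ List.range (n.toNat + 1), (fun k => pathB n par k u) x = true := ⟨k, hmem, h⟩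
  have hlt : (List.range (n.toNat + 1)).findIdx (fun k => pathB n par k u) < (List.range (n.toNat + 1)).length :=
    List.findIdx_lt_length_of_exists hex
  have hp := List.findIdx_getElem (w := hlt)
  rw [List.getElem_range] at hp
  exact pathB_unique n par _ k u hp h

theorem chn_eq (n : Int) (par : List Int) (u : Int) (k : Nat) (hn : 1 ≤ n)
    (h : pathB n par k u = true) : chn n par u = pl n par k u := by
  unfold chn; rw [depf_eq n par u k hn h]

theorem path_start_bounds (n : Int) (par : List Int) (hn : 1 ≤ n) (k : Nat) (u : Int)
    (h : pathB n par k u = true) : 1 ≤ u ∧ u ≤ n := by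
  cases k with
  | zero =>
    simp only [pathB, beq_iff_eq] at h
    omega
  | succ k =>
    simp only [pathB, Bool.and_eq_true, decide_eq_true_eq] at h
    omega

theorem reachb_bounds (n : Int) (par : List Int) (hn : 1 ≤ n) (u : Int)
    (h : reachb n par u = true) : 1 ≤ u ∧ u ≤ n := by
  obtain ⟨k, hk⟩ := (reachb_iff n par u hn).1 h
  exact path_start_bounds n par hn k u hk

theorem reachb_one (n : Int) (par : List Int) : reachb n par 1 = true := by
  unfold reachb
  rw [List.any_eq_true]
  exact ⟨0, List.mem_range.2 (by omega), by simp [pathB]⟩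

theorem getElem?_eq_some_getD {α : Type} [Inhabited α] (l : List α) (j : Nat) (d : α)
    (h : j < l.length) : l[j]? = some (l.getD j d) := by
  rw [List.getElem?_eq_getElem h, List.getD_eq_getElem l d h]

-- index normalization (used by both ports' index accesses)
theorem pyIdx?_norm (len : Nat) (p n : Int) (hn : 1 ≤ n) (hlen : (len : Int) = n + 1)
    (hlo : -(n+1) ≤ p) (hhi : p ≤ n) :
    PySem.List.pyIdx? len p = some (PySem.Int.mod p (n+1)).toNat := by
  have hpos : (0:Int) < n + 1 := by omega
  rw [PySem.Int.mod_eq_emod_of_pos hpos]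
  unfold PySem.List.pyIdx?
  by_cases h0 : 0 ≤ p
  · rw [if_pos h0, if_pos (by omega)]
    have he : p % (n+1) = p := Int.emod_eq_of_lt h0 (by omega)
    rw [he]
  · rw [if_neg h0, if_pos (by omega)]
    have he : p % (n+1) = p + (n+1) := by
      have h2 : (p + (n+1)) % (n+1) = p % (n+1) := Int.add_emod_right p (n+1)
      rw [← h2]
      exact Int.emod_eq_of_lt (by omega) (by omega)
    rw [he]
    congr 1
    omega

theorem val_access (n : Int) (val : List Int) (u : Int) (hu1 : 1 ≤ u) (hun : u ≤ n)
    (hval : n + 1 ≤ (val.length : Int)) :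
    PySem.List.pyGet? val u = some (PySem.List.pyGetD val u 0) := by
  have h0 : (0:Int) ≤ u := by omega
  have h1 : u < (val.length : Int) := by omega
  rw [PySem.List.pyGet?_eq_some_getElem val h0 h1, PySem.List.pyGetD_eq_getElem val 0 h0 h1]

theorem contrib_of_reach (n : Int) (par val : List Int) (u : Int) (k : Nat) (hn : 1 ≤ n)
    (hr : reachb n par u = true) (hk : pathB n par k u = true) (j : Int) :
    contrib n par val u j = if j ∈ pl n par k u then PySem.List.pyGetD val u 0 else 0 := by
  unfold contrib
  rw [chn_eq n par u k hn hk, hr]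
  simp

-- ---- sum helpers ----
theorem sum_ite_zero (l : List Int) (p : Int → Bool) (f : Int → Int)
    (h : ∀ v ∈ l, p v = false) :
    (l.map (fun v => if p v then f v else 0)).sum = 0 := by
  induction l with
  | nil => rfl
  | cons a l ih =>
    simp only [List.map_cons, List.sum_cons, h a (List.mem_cons_self)]
    rw [ih (fun v hv => h v (List.mem_cons_of_mem _ hv))]
    simp

theorem sum_ite_single (l : List Int) (c : Int) (p : Int → Bool) (f : Int → Int)
    (hnd : l.Nodup) (hc : c ∈ l) (hpc : p c = true)
    (huniq : ∀ c' ∈ l, p c' = true → c' = c) :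
    (l.map (fun v => if p v then f v else 0)).sum = f c := by
  induction l with
  | nil => cases hc
  | cons a l ih =>
    simp only [List.map_cons, List.sum_cons]
    rcases List.mem_cons.1 hc with rfl | hcl
    · rw [if_pos hpc]
      rw [sum_ite_zero l p f (fun v hv => by
        by_contra hcon
        have : v = c := huniq v (List.mem_cons_of_mem _ hv) (by
          cases hpv : p v
          · exact absurd hpv hcon
          · rfl)
        subst this
        exact (List.nodup_cons.1 hnd).1 hv)]
      simp
    · have hac : a ≠ c := by
        intro h
        subst h
        exact (List.nodup_cons.1 hnd).1 hcl
      have hpa : p a = false := by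
        cases hpa : p a
        · rfl
        · exact absurd (huniq a (List.mem_cons_self) hpa) hac
      rw [if_neg (by simp [hpa])]
      rw [ih (List.nodup_cons.1 hnd).2 hcl (fun c' hc' hp => huniq c' (List.mem_cons_of_mem _ hc') hp)]
      simp

theorem sum_map_swap (l m : List Int) (h : Int → Int → Int) :
    (l.map (fun v => (m.map (fun c => h v c)).sum)).sum
      = (m.map (fun c => (l.map (fun v => h v c)).sum)).sum := by
  induction m with
  | nil => simp
  | cons c m ih =>
    simp only [List.map_cons, List.sum_cons]
    rw [← ih, ← PySem.List.sum_map_add_int]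

-- ---- A-side: tree building ----
theorem pyGet?_norm {α : Type} [Inhabited α] (xs : List α) (p n : Int) (hn : 1 ≤ n)
    (hlen : (xs.length : Int) = n + 1) (hlo : -(n+1) ≤ p) (hhi : p ≤ n) (d : α) :
    PySem.List.pyGet? xs p = some (xs.getD (PySem.Int.mod p (n+1)).toNat d) := by
  unfold PySem.List.pyGet?
  rw [pyIdx?_norm xs.length p n hn hlen hlo hhi]
  have hpos : (0:Int) < n + 1 := by omega
  have hlt : (PySem.Int.mod p (n+1)).toNat < xs.length := by
    have := PySem.Int.mod_lt p hpos
    have := PySem.Int.mod_nonneg p hpos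
    omega
  simp only [Option.bind_some]
  exact getElem?_eq_some_getD xs _ d hlt

theorem pySet?_norm {α : Type} (xs : List α) (p n : Int) (hn : 1 ≤ n)
    (hlen : (xs.length : Int) = n + 1) (hlo : -(n+1) ≤ p) (hhi : p ≤ n) (x : α) :
    PySem.List.pySet? xs p x = some (xs.set (PySem.Int.mod p (n+1)).toNat x) := by
  unfold PySem.List.pySet?
  rw [pyIdx?_norm xs.length p n hn hlen hlo hhi]
  rfl

theorem buildA_spec (n : Int) (par : List Int) (hc : Ctx n par) :
    ∀ (l : List Int) (tree : List (List Int)),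
    (∀ i ∈ l, 2 ≤ i ∧ i ≤ n) → tree.length = n.toNat + 1 →
    ∃ tree', List.foldlM (buildStep par) tree l = some tree' ∧ tree'.length = n.toNat + 1 ∧
      ∀ w : Nat, w < n.toNat + 1 →
        tree'[w]? = some (tree.getD w [] ++ l.filter (fun i => decide (gstep n par i = (w : Int)))) := by
  intro l
  induction l with
  | nil =>
    intro tree _ hlen
    refine ⟨tree, rfl, hlen, fun w hw => ?_⟩
    rw [List.filter_nil, List.append_nil]
    exact getElem?_eq_some_getD tree w [] (by omega)
  | cons i l ih =>
    intro tree hmem hlen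
    obtain ⟨h2, hin⟩ := hmem i (List.mem_cons_self)
    have hn := hc.1
    have hcast : ((tree.length : Nat) : Int) = n + 1 := by omega
    have hp := hc.2 i h2 hin
    have hmlt : (PySem.Int.mod (PySem.List.pyGetD par i 0) (n+1)).toNat < tree.length := by
      have h1 := PySem.Int.mod_lt (PySem.List.pyGetD par i 0) (b := n+1) (by omega)
      have h2' := PySem.Int.mod_nonneg (PySem.List.pyGetD par i 0) (b := n+1) (by omega)
      omega
    set m := (PySem.Int.mod (PySem.List.pyGetD par i 0) (n+1)).toNat with hmdef
    have hm : gstep n par i = PySem.Int.mod (PySem.List.pyGetD par i 0) (n+1) := rfl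
    have hstep : buildStep par tree i = some (tree.set m (tree.getD m [] ++ [i])) := by
      unfold buildStep
      rw [hp.1]
      dsimp only
      rw [pyGet?_norm tree (PySem.List.pyGetD par i 0) n hn hcast hp.2.1 hp.2.2 []]
      dsimp only
      rw [pySet?_norm tree (PySem.List.pyGetD par i 0) n hn hcast hp.2.1 hp.2.2]
    rw [List.foldlM_cons, hstep]
    set tree1 := tree.set m (tree.getD m [] ++ [i]) with ht1
    obtain ⟨tree', he, hlen', hval⟩ := ih tree1
      (fun v hv => hmem v (List.mem_cons_of_mem _ hv)) (by simp [ht1]; omega)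
    refine ⟨tree', he, hlen', fun w hw => ?_⟩
    rw [hval w hw]
    have hT1 : tree1.getD w [] = tree.getD w [] ++ (if gstep n par i = (w:Int) then [i] else []) := by
      have hmnn := PySem.Int.mod_nonneg (PySem.List.pyGetD par i 0) (b := n+1) (by omega)
      by_cases hwm : w = m
      · have hgw : gstep n par i = (w : Int) := by rw [hm, hwm]; omega
        simp [ht1, hgw, List.getD_eq_getElem?_getD, hmlt, hwm]
      · have hgw : ¬ (gstep n par i = (w : Int)) := by
          rw [hm]
          intro hcon
          apply hwm
          omega
        simp [ht1, hgw, List.getD_eq_getElem?_getD, Ne.symm hwm]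
    rw [hT1, List.filter_cons]
    by_cases hgi : gstep n par i = (w : Int)
    · rw [if_pos hgi, if_pos (by simpa using hgi)]
      simp
    · rw [if_neg hgi, if_neg (by simpa using hgi)]
      simp

theorem mem_childrenL (n : Int) (par : List Int) (u c : Int) :
    c ∈ childrenL n par u ↔ (2 ≤ c ∧ c ≤ n ∧ gstep n par c = u) := by
  unfold childrenL
  rw [List.mem_filter, PySem.List.mem_pyRange_one]
  constructor
  · rintro ⟨⟨ha, hb⟩, hd⟩
    exact ⟨ha, by omega, by simpa using hd⟩
  · rintro ⟨ha, hb, hd⟩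
    exact ⟨⟨ha, by omega⟩, by simpa using hd⟩

theorem childrenL_nodup (n : Int) (par : List Int) (u : Int) : (childrenL n par u).Nodup :=
  List.Nodup.filter _ (PySem.List.nodup_pyRange_one 2 (n+1))

theorem childrenL_reach (n : Int) (par : List Int) (hn : 1 ≤ n) (u c : Int)
    (hu : reachb n par u = true) (hc : c ∈ childrenL n par u) : reachb n par c = true := by
  obtain ⟨k, hk⟩ := (reachb_iff n par u hn).1 hu
  obtain ⟨h2, hcn, hg⟩ := (mem_childrenL n par u c).1 hc
  refine (reachb_iff n par c hn).2 ⟨k+1, ?_⟩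
  simp only [pathB, Bool.and_eq_true, decide_eq_true_eq]
  rw [hg]
  exact ⟨⟨h2, hcn⟩, hk⟩

-- ---- chain structure ----
theorem gstep_orb (n : Int) (par : List Int) (i : Nat) (u : Int) :
    gstep n par (orb n par i u) = orb n par (1 + i) u := by
  rw [← orb_add]
  rfl

theorem chain_succ (n : Int) (par : List Int) (k : Nat) (j c : Int)
    (hk : pathB n par k j = true) (hc : c ∈ pl n par k j) (h2 : 2 ≤ c) :
    gstep n par c ∈ pl n par k j := by
  obtain ⟨i, hik, rfl⟩ := (mem_pl n par k j c).1 hc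
  have hilt : i < k := by
    rcases Nat.lt_or_ge i k with h | h
    · exact h
    · exfalso
      have hlast := (pathB_orb n par k j hk).2
      rw [show i = k by omega] at h2
      omega
  rw [gstep_orb]
  exact (mem_pl n par k j _).2 ⟨1 + i, by omega, rfl⟩

theorem chain_pred_unique (n : Int) (par : List Int) (k : Nat) (j c c' : Int)
    (hk : pathB n par k j = true) (hc : c ∈ pl n par k j) (hc' : c' ∈ pl n par k j)
    (h2 : 2 ≤ c) (h2' : 2 ≤ c') (he : gstep n par c = gstep n par c') : c = c' := by
  obtain ⟨i, hik, hio⟩ := (mem_pl n par k j c).1 hc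
  obtain ⟨i', hik', hio'⟩ := (mem_pl n par k j c').1 hc'
  have hilt : i < k := by
    rcases Nat.lt_or_ge i k with h | h
    · exact h
    · exfalso
      have hlast := (pathB_orb n par k j hk).2
      rw [show i = k by omega] at hio
      omega
  have hilt' : i' < k := by
    rcases Nat.lt_or_ge i' k with h | h
    · exact h
    · exfalso
      have hlast := (pathB_orb n par k j hk).2
      rw [show i' = k by omega] at hio'
      omega
  have horb : orb n par (1+i) j = orb n par (1+i') j := by
    rw [← gstep_orb, ← gstep_orb, hio, hio', he]
  have hnd := pl_nodup n par k j hk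
  rw [pl_eq_map] at hnd
  have hinj := List.Nodup.getElem_inj_iff hnd
    (i := 1 + i) (j := 1 + i')
    (hi := by simp [List.length_range]; omega) (hj := by simp [List.length_range]; omega)
  simp only [List.getElem_map, List.getElem_range] at hinj
  have : 1 + i = 1 + i' := hinj.1 horb
  have : i = i' := by omega
  subst this
  rw [← hio, ← hio']

theorem mem_chain_step (n : Int) (par : List Int) (k : Nat) (j u : Int)
    (hk : pathB n par k j = true) (hu : u ∈ pl n par k j) (hne : u ≠ j) :
    ∃ c, c ∈ pl n par k j ∧ 2 ≤ c ∧ c ≤ n ∧ gstep n par c = u := by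
  obtain ⟨i, hik, rfl⟩ := (mem_pl n par k j u).1 hu
  have hi1 : 1 ≤ i := by
    by_contra h
    have : i = 0 := by omega
    subst this
    exact hne rfl
  have hb := (pathB_orb n par k j hk).1 (i - 1) (by omega)
  refine ⟨orb n par (i-1) j, (mem_pl n par k j _).2 ⟨i-1, by omega, rfl⟩, hb.1, hb.2, ?_⟩
  rw [gstep_orb]
  congr 1
  omega

theorem no_child_in_own_chain (n : Int) (par : List Int) (k : Nat) (u c : Int)
    (hk : pathB n par k u = true) (h2 : 2 ≤ c) (hcn : c ≤ n) (hg : gstep n par c = u) :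
    c ∉ pl n par k u := by
  intro hmem
  obtain ⟨i, hik, hio⟩ := (mem_pl n par k u c).1 hmem
  have hshift := pathB_shift n par k i u hk hik
  rw [hio] at hshift
  have hpc : pathB n par (k+1) c = true := by
    simp only [pathB, Bool.and_eq_true, decide_eq_true_eq]
    rw [hg]
    exact ⟨⟨h2, hcn⟩, hk⟩
  have := pathB_unique n par (k - i) (k+1) c hshift hpc
  omega

theorem reach_of_mem_chain (n : Int) (par : List Int) (hn : 1 ≤ n) (k : Nat) (u j : Int)
    (hk : pathB n par k u = true) (hj : j ∈ pl n par k u) : reachb n par j = true := by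
  obtain ⟨i, hik, rfl⟩ := (mem_pl n par k u j).1 hj
  exact (reachb_iff n par _ hn).2 ⟨k - i, pathB_shift n par k i u hk hik⟩

theorem Tsum_zero_of_not_reach (n : Int) (par val : List Int) (hn : 1 ≤ n) (j : Int)
    (hj : reachb n par j = false) : Tsum n par val j = 0 := by
  unfold Tsum
  rw [List.map_congr_left (g := fun _ => (0:Int)) ?_]
  · simp
  · intro u _
    unfold contrib
    cases hr : reachb n par u with
    | false => simp
    | true =>
      obtain ⟨k, hk⟩ := (reachb_iff n par u hn).1 hr
      rw [chn_eq n par u k hn hk]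
      simp only [Bool.true_and]
      cases hcon : (pl n par k u).contains j with
      | false => simp
      | true =>
        exfalso
        rw [List.contains_iff_mem] at hcon
        have := reach_of_mem_chain n par hn k u j hk hcon
        rw [hj] at this
        exact Bool.noConfusion this

theorem Tsum_dec (n : Int) (par val : List Int) (hn : 1 ≤ n) (ku : Nat) (u : Int)
    (hku : pathB n par ku u = true) :
    Tsum n par val u = PySem.List.pyGetD val u 0 + ((childrenL n par u).map (Tsum n par val)).sum := by
  have hub := path_start_bounds n par hn ku u hku
  have hru : reachb n par u = true := (reachb_iff n par u hn).2 ⟨ku, hku⟩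
  have hpt : ∀ v ∈ PySem.List.pyRange 1 (n+1) 1,
      contrib n par val v u =
        (if v == u then PySem.List.pyGetD val v 0 else 0)
          + ((childrenL n par u).map (fun c => contrib n par val v c)).sum := by
    intro v _
    cases hrv : reachb n par v with
    | false =>
      have hvu : ¬ (v == u) = true := by
        intro hcon
        rw [beq_iff_eq] at hcon
        rw [hcon, hru] at hrv
        exact Bool.noConfusion hrv
      have hz : ∀ c ∈ childrenL n par u, contrib n par val v c = 0 := by
        intro c _
        simp [contrib, hrv]
      rw [List.map_congr_left (g := fun _ => (0:Int)) hz]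
      simp [contrib, hrv, hvu]
    | true =>
      obtain ⟨kv, hkv⟩ := (reachb_iff n par v hn).1 hrv
      by_cases hveq : v = u
      · rw [hveq]
        have hz : ∀ c ∈ childrenL n par u, contrib n par val u c = 0 := by
          intro c hcmem
          obtain ⟨h2c, hcn, hgc⟩ := (mem_childrenL n par u c).1 hcmem
          rw [contrib_of_reach n par val u ku hn hru hku]
          rw [if_neg (no_child_in_own_chain n par ku u c hku h2c hcn hgc)]
        rw [List.map_congr_left (g := fun _ => (0:Int)) hz,
          contrib_of_reach n par val u ku hn hru hku, if_pos (self_mem_pl n par ku u)]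
        simp
      · have hbeq : (v == u) = false := by simp [hveq]
        have hcr : ∀ c ∈ childrenL n par u,
            contrib n par val v c = if decide (c ∈ pl n par kv v) then PySem.List.pyGetD val v 0 else 0 := by
          intro c _
          rw [contrib_of_reach n par val v kv hn hrv hkv]
          simp
        rw [List.map_congr_left hcr]
        rw [contrib_of_reach n par val v kv hn hrv hkv]
        simp only [hbeq, Bool.false_eq_true, if_false, zero_add]
        by_cases humem : u ∈ pl n par kv v
        · obtain ⟨c0, hc0mem, h2c0, hc0n, hgc0⟩ := mem_chain_step n par kv v u hkv humem (fun h => hveq h.symm)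
          rw [sum_ite_single (childrenL n par u) c0 _ _ (childrenL_nodup n par u)
            ((mem_childrenL n par u c0).2 ⟨h2c0, hc0n, hgc0⟩) (by simpa using hc0mem)
            (fun c' hc' hp => by
              obtain ⟨h2', hn', hg'⟩ := (mem_childrenL n par u c').1 hc'
              exact chain_pred_unique n par kv v c' c0 hkv (by simpa using hp) hc0mem h2' h2c0 (by rw [hg', hgc0]))]
          rw [if_pos humem]
        · rw [if_neg humem, sum_ite_zero _ _ _ (fun c hcmem => by
            obtain ⟨h2c, hcn, hgc⟩ := (mem_childrenL n par u c).1 hcmem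
            simp only [decide_eq_false_iff_not]
            intro hcon
            exact humem (hgc ▸ chain_succ n par kv v c hkv hcon h2c))]
  unfold Tsum
  rw [List.map_congr_left hpt, PySem.List.sum_map_add_int]
  congr 1
  · exact sum_ite_single (PySem.List.pyRange 1 (n+1) 1) u _ _
      (PySem.List.nodup_pyRange_one 1 (n+1))
      (by rw [PySem.List.mem_pyRange_one]; omega) (by simp)
      (fun c' _ hp => by simpa using hp)
  · rw [sum_map_swap]

-- ---- A-side: the recursive dfs ----
theorem dfsA_main (n : Int) (par val : List Int) (hc : Ctx n par)
    (hval : n + 1 ≤ (val.length : Int)) (tree : List (List Int))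
    (htree : ∀ w : Nat, w < n.toNat + 1 → tree[w]? = some (childrenL n par (w : Int))) :
    ∀ (fuel k : Nat) (u : Int) (res : List Int), pathB n par k u = true →
      res.length = n.toNat + 1 → n.toNat ≤ fuel + k →
      ∃ res', dfsA tree val fuel u res = some (res', Tsum n par val u) ∧
        res'.length = n.toNat + 1 ∧
        ∀ j : Nat, j < n.toNat + 1 →
          res'[j]? = some (if reachb n par (j:Int) && (chn n par (j:Int)).contains u
            then Tsum n par val (j:Int) else res.getD j 0) := by
  intro fuel
  induction fuel with
  | zero =>
    intro k u res hk _ hfuel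
    exfalso
    have := path_card n par k u hc.1 hk
    omega
  | succ fuel ih =>
    intro k u res hk hres hfuel
    have hn := hc.1
    have hub := path_start_bounds n par hn k u hk
    have hru : reachb n par u = true := (reachb_iff n par u hn).2 ⟨k, hk⟩
    have hvu := val_access n val u hub.1 hub.2 hval
    have hunat : u.toNat < n.toNat + 1 := by omega
    have htu : PySem.List.pyGet? tree u = some (childrenL n par u) := by
      rw [PySem.List.pyGet?_of_nonneg tree (by omega), htree u.toNat hunat,
        show ((u.toNat : Nat) : Int) = u from by omega]
    have inner : ∀ (cs : List Int), (∀ c ∈ cs, c ∈ childrenL n par u) → cs.Nodup →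
        ∀ (res1 : List Int) (s : Int), res1.length = n.toNat + 1 →
        ∃ res2, dfsChildren tree val fuel cs res1 s
            = some (res2, s + (cs.map (Tsum n par val)).sum) ∧
          res2.length = n.toNat + 1 ∧
          ∀ j : Nat, j < n.toNat + 1 →
            res2[j]? = some (if reachb n par (j:Int) && cs.any (fun c => (chn n par (j:Int)).contains c)
              then Tsum n par val (j:Int) else res1.getD j 0) := by
      intro cs
      induction cs with
      | nil =>
        intro _ _ res1 s hres1
        refine ⟨res1, by simp [dfsChildren], hres1, fun j hj => ?_⟩
        simp only [List.any_nil, Bool.and_false, Bool.false_eq_true, if_false]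
        exact getElem?_eq_some_getD res1 j 0 (by omega)
      | cons c cs' ihc =>
        intro hmem hnd res1 s hres1
        obtain ⟨h2c, hcn, hgc⟩ := (mem_childrenL n par u c).1 (hmem c (List.mem_cons_self))
        have hpc : pathB n par (k+1) c = true := by
          simp only [pathB, Bool.and_eq_true, decide_eq_true_eq]
          rw [hgc]
          exact ⟨⟨h2c, hcn⟩, hk⟩
        obtain ⟨resc, hec, hlenc, hvc⟩ := ih (k+1) c res1 hpc hres1 (by omega)
        obtain ⟨res2, he2, hlen2, hv2⟩ := ihc (fun v hv => hmem v (List.mem_cons_of_mem _ hv))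
          (List.Nodup.of_cons hnd) resc (s + Tsum n par val c) hlenc
        refine ⟨res2, ?_, hlen2, fun j hj => ?_⟩
        · simp only [dfsChildren]
          rw [hec]
          dsimp only
          rw [List.map_cons, List.sum_cons, ← add_assoc]
          exact he2
        · rw [hv2 j hj]
          have hgd : resc.getD j 0 = (if reachb n par (j:Int) && (chn n par (j:Int)).contains c
              then Tsum n par val (j:Int) else res1.getD j 0) := by
            rw [List.getD_eq_getElem?_getD, hvc j hj]
            rfl
          rw [hgd]
          simp only [List.any_cons]
          cases hrj : reachb n par (j:Int) with
          | false => simp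
          | true =>
            by_cases hQ : c ∈ chn n par (j:Int) <;>
              by_cases hE : ∃ x ∈ cs', x ∈ chn n par (j:Int) <;>
                simp [hQ, hE]
    obtain ⟨res2, he2, hlen2, hv2⟩ := inner (childrenL n par u) (fun c h => h)
      (childrenL_nodup n par u) res (PySem.List.pyGetD val u 0) hres
    have hTu : PySem.List.pyGetD val u 0 + ((childrenL n par u).map (Tsum n par val)).sum
        = Tsum n par val u := (Tsum_dec n par val hn k u hk).symm
    have hsetu : PySem.List.pySet? res2 u (Tsum n par val u)
        = some (res2.set u.toNat (Tsum n par val u)) := by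
      have h1 := PySem.List.pySet?_natCast res2 u.toNat (Tsum n par val u) (by omega)
      rwa [show ((u.toNat : Nat) : Int) = u from by omega] at h1
    refine ⟨res2.set u.toNat (Tsum n par val u), ?_, by simp [hlen2], fun j hj => ?_⟩
    · simp only [dfsA]
      rw [hvu]
      dsimp only
      rw [htu]
      dsimp only
      rw [he2]
      dsimp only
      rw [hTu, hsetu]
    · rw [List.getElem?_set]
      by_cases hju : u.toNat = j
      · rw [if_pos hju, if_pos (by rw [hlen2]; omega)]
        have hjeq : (j : Int) = u := by omega
        rw [hjeq]
        have hcontains : (chn n par u).contains u = true := by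
          rw [chn_eq n par u k hn hk, List.contains_iff_mem]
          exact self_mem_pl n par k u
        rw [hru, hcontains]
        simp
      · rw [if_neg hju, hv2 j hj]
        have hjne : (j : Int) ≠ u := by omega
        cases hrj : reachb n par (j:Int) with
        | false => simp
        | true =>
          obtain ⟨kj, hkj⟩ := (reachb_iff n par (j:Int) hn).1 hrj
          rw [chn_eq n par (j:Int) kj hn hkj]
          have hiff : ((childrenL n par u).any (fun c => (pl n par kj (j:Int)).contains c))
              = ((pl n par kj (j:Int)).contains u) := by
            cases hU : (pl n par kj (j:Int)).contains u with
            | true =>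
              rw [List.contains_iff_mem] at hU
              obtain ⟨c0, hc0mem, h2c0, hc0n, hgc0⟩ := mem_chain_step n par kj (j:Int) u hkj hU
                (fun h => hjne h.symm)
              rw [List.any_eq_true]
              exact ⟨c0, (mem_childrenL n par u c0).2 ⟨h2c0, hc0n, hgc0⟩,
                by rw [List.contains_iff_mem]; exact hc0mem⟩
            | false =>
              rw [List.any_eq_false]
              intro c hcmem
              obtain ⟨h2c, hcn', hgc⟩ := (mem_childrenL n par u c).1 hcmem
              intro hcon
              rw [List.contains_iff_mem] at hcon
              have := chain_succ n par kj (j:Int) c hkj hcon h2c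
              rw [hgc] at this
              rw [← List.contains_iff_mem] at this
              rw [hU] at this
              exact Bool.noConfusion this
          rw [hiff]

-- ---- B-side: the stack DFS ----

-- tree access for an Int index, from the Nat-indexed tree description
theorem tree_access (n : Int) (par : List Int) (tree : List (List Int))
    (htree : ∀ w : Nat, w < n.toNat + 1 → tree[w]? = some (childrenL n par (w : Int)))
    (u : Int) (hu1 : 1 ≤ u) (hun : u ≤ n) :
    PySem.List.pyGet? tree u = some (childrenL n par u) := by
  rw [PySem.List.pyGet?_of_nonneg tree (by omega), htree u.toNat (by omega),
    show ((u.toNat : Nat) : Int) = u from by omega]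

theorem stackLoop_spec (n : Int) (par : List Int) (hn : 1 ≤ n) (tree : List (List Int))
    (htree : ∀ w : Nat, w < n.toNat + 1 → tree[w]? = some (childrenL n par (w : Int))) :
    ∀ (fuel : Nat) (stack order : List Int),
    (order ++ stack).Nodup →
    (∀ u ∈ order ++ stack, reachb n par u = true) →
    (1 : Int) ∈ order ++ stack →
    (∀ (i : Nat) (hi : i < order.length),
      ∀ c ∈ childrenL n par (order[i]'hi), c ∈ order.drop (i+1) ++ stack) →
    (∀ c : Int, 2 ≤ c → c ≤ n → c ∈ order ++ stack → gstep n par c ∈ order) →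
    (Rlist n par).length + 1 ≤ fuel + order.length →
    ∃ ord, stackLoop tree fuel stack order = some ord ∧
      ord.Nodup ∧ (∀ u ∈ ord, reachb n par u = true) ∧ (1:Int) ∈ ord ∧
      (∀ (i : Nat) (hi : i < ord.length),
        ∀ c ∈ childrenL n par (ord[i]'hi), c ∈ ord.drop (i+1)) := by
  intro fuel
  induction fuel with
  | zero =>
    intro stack order hnd hreach h1 hclos hvp hfuel
    exfalso
    have hsub : order ⊆ Rlist n par := by
      intro u hu
      have hr := hreach u (List.mem_append_left _ hu)
      have hb := reachb_bounds n par hn u hr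
      unfold Rlist
      rw [List.mem_filter, PySem.List.mem_pyRange_one]
      exact ⟨⟨hb.1, by omega⟩, hr⟩
    have := (List.subperm_of_subset ((List.nodup_append.1 hnd).1) hsub).length_le
    omega
  | succ fuel ih =>
    intro stack order hnd hreach h1 hclos hvp hfuel
    rcases List.eq_nil_or_concat stack with rfl | ⟨s', u, rfl⟩
    · -- stack empty: the while loop exits with the accumulated order
      refine ⟨order, by simp [stackLoop, PySem.List.pop?], ?_, ?_, ?_, ?_⟩
      · simpa using hnd
      · intro v hv; exact hreach v (by simpa using hv)
      · simpa using h1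
      · intro i hi c hc
        simpa using hclos i hi c hc
    · -- pop u from the top of the stack, push its children
      simp only [List.concat_eq_append] at hnd hreach h1 hclos hvp ⊢
      have humem : u ∈ order ++ (s' ++ [u]) := by simp
      have hru : reachb n par u = true := hreach u humem
      have hub := reachb_bounds n par hn u hru
      have htu := tree_access n par tree htree u hub.1 hub.2
      have hUnotOrder : u ∉ order := by
        have hdisj := List.disjoint_of_nodup_append hnd
        exact fun hcon => hdisj hcon (by simp)
      -- children of u are fresh
      have hfresh : ∀ c ∈ childrenL n par u, c ∉ order ++ (s' ++ [u]) := by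
        intro c hc hcon
        obtain ⟨h2c, hcn, hgc⟩ := (mem_childrenL n par u c).1 hc
        have := hvp c h2c hcn hcon
        rw [hgc] at this
        exact hUnotOrder this
      -- the new state
      have hstep : stackLoop tree (fuel+1) (s' ++ [u]) order
          = stackLoop tree fuel (s' ++ childrenL n par u) (order ++ [u]) := by
        simp only [stackLoop, PySem.List.pop?_last, htu]
      rw [hstep]
      -- invariants for the recursive call
      set C := childrenL n par u with hC
      have hperm : ((order ++ [u]) ++ (s' ++ C)).Perm ((order ++ (s' ++ [u])) ++ C) := by
        simp only [List.append_assoc]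
        refine List.Perm.append_left order ?_
        simpa [List.append_assoc] using
          List.Perm.append_right C (List.perm_append_comm (l₁ := [u]) (l₂ := s'))
      have hnd2 : ((order ++ [u]) ++ (s' ++ C)).Nodup := by
        refine hperm.symm.nodup ?_
        exact List.Nodup.append hnd (childrenL_nodup n par u) (List.disjoint_right.2 hfresh)
      have hreach2 : ∀ v ∈ (order ++ [u]) ++ (s' ++ C), reachb n par v = true := by
        intro v hv
        simp only [List.mem_append, List.mem_singleton] at hv
        rcases hv with (hv | rfl) | hv | hv
        · exact hreach v (by simp [hv])
        · exact hru
        · exact hreach v (by simp [hv])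
        · exact childrenL_reach n par hn u v hru hv
      have h12 : (1:Int) ∈ (order ++ [u]) ++ (s' ++ C) := by
        simp only [List.mem_append, List.mem_singleton] at h1 ⊢
        tauto
      have hclos2 : ∀ (i : Nat) (hi : i < (order ++ [u]).length),
          ∀ c ∈ childrenL n par (((order ++ [u])[i]'hi)), c ∈ (order ++ [u]).drop (i+1) ++ (s' ++ C) := by
        intro i hi c hc
        simp only [List.length_append, List.length_singleton] at hi
        rcases Nat.lt_or_ge i order.length with hilt | hige
        · rw [List.getElem_append_left hilt] at hc
          have hold := hclos i hilt c hc
          rw [List.drop_append_of_le_length (by omega)]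
          simp only [List.mem_append] at hold ⊢
          rcases hold with h | h | h
          · tauto
          · tauto
          · simp only [List.mem_singleton] at h
            subst h
            simp
        · have hie : i = order.length := by omega
          subst hie
          rw [List.getElem_append_right (le_refl _)] at hc
          simp only [Nat.sub_self, List.getElem_singleton] at hc
          have hdropnil : (order ++ [u]).drop (order.length + 1) = [] := by
            apply List.drop_eq_nil_of_le
            simp
          rw [hdropnil]
          simp only [List.nil_append, List.mem_append]
          right
          exact hc
      have hvp2 : ∀ c : Int, 2 ≤ c → c ≤ n → c ∈ (order ++ [u]) ++ (s' ++ C) →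
          gstep n par c ∈ order ++ [u] := by
        intro c h2 hcn hcmem
        simp only [List.mem_append, List.mem_singleton] at hcmem
        rcases hcmem with (hv | rfl) | hv | hv
        · exact List.mem_append_left _ (hvp c h2 hcn (by simp [hv]))
        · exact List.mem_append_left _ (hvp c h2 hcn humem)
        · exact List.mem_append_left _ (hvp c h2 hcn (by simp [hv]))
        · obtain ⟨_, _, hg⟩ := (mem_childrenL n par u c).1 hv
          rw [hg]
          simp
      have hfuel2 : (Rlist n par).length + 1 ≤ fuel + (order ++ [u]).length := by
        simp only [List.length_append, List.length_singleton]
        omega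
      exact ih (s' ++ C) (order ++ [u]) hnd2 hreach2 h12 hclos2 hvp2 hfuel2

-- completeness of the order: every reachable node occurs in it
theorem reach_mem_ord (n : Int) (par : List Int) (ord : List Int)
    (h1 : (1:Int) ∈ ord)
    (hclos : ∀ (i : Nat) (hi : i < ord.length),
      ∀ c ∈ childrenL n par (ord[i]'hi), c ∈ ord.drop (i+1)) :
    ∀ (k : Nat) (u : Int), pathB n par k u = true → u ∈ ord := by
  intro k
  induction k with
  | zero =>
    intro u hu
    simp only [pathB, beq_iff_eq] at hu
    rwa [hu]
  | succ k ihk =>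
    intro u hu
    simp only [pathB, Bool.and_eq_true, decide_eq_true_eq] at hu
    obtain ⟨⟨h2, hun⟩, hp⟩ := hu
    have hg : gstep n par u ∈ ord := ihk (gstep n par u) hp
    obtain ⟨i, hi, hgi⟩ := List.mem_iff_getElem.1 hg
    have hcu : u ∈ childrenL n par (ord[i]'hi) := by
      rw [hgi]
      exact (mem_childrenL n par (gstep n par u) u).2 ⟨h2, hun, rfl⟩
    exact List.mem_of_mem_drop (hclos i hi u hcu)

-- 'sum(res[c] for c in children[u])' evaluates to the sum of the looked-up values
theorem childSum_spec (res : List Int) (f : Int → Int) :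
    ∀ (cs : List Int), (∀ c ∈ cs, PySem.List.pyGet? res c = some (f c)) →
    ∀ s : Int, cs.foldlM (fun s c => (PySem.List.pyGet? res c).map (fun x => s + x)) s
      = some (s + (cs.map f).sum) := by
  intro cs
  induction cs with
  | nil => intro _ s; simp
  | cons c cs' ih =>
    intro h s
    rw [List.foldlM_cons, h c (List.mem_cons_self)]
    show List.foldlM _ (s + f c) cs' = _
    rw [ih (fun v hv => h v (List.mem_cons_of_mem _ hv)) (s + f c)]
    simp [add_assoc]

-- the reversed-order accumulation loop
theorem accFold (n : Int) (par val : List Int) (hn : 1 ≤ n)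
    (hval : n + 1 ≤ (val.length : Int)) (tree : List (List Int))
    (htree : ∀ w : Nat, w < n.toNat + 1 → tree[w]? = some (childrenL n par (w : Int)))
    (ord : List Int) (hreach : ∀ u ∈ ord, reachb n par u = true)
    (hclos : ∀ (i : Nat) (hi : i < ord.length),
      ∀ c ∈ childrenL n par (ord[i]'hi), c ∈ ord.drop (i+1)) :
    ∀ (ord2 ord1 : List Int), ord = ord1 ++ ord2 →
    ∃ r, ord2.reverse.foldlM (accStep tree val) (List.replicate (n+1).toNat 0) = some r ∧
      r.length = n.toNat + 1 ∧
      ∀ j : Nat, j < n.toNat + 1 →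
        r[j]? = some (if (j:Int) ∈ ord2 then Tsum n par val (j:Int) else 0) := by
  intro ord2
  induction ord2 with
  | nil =>
    intro ord1 _
    have hjlt : ∀ j : Nat, j < n.toNat + 1 → j < (n+1).toNat := by omega
    refine ⟨List.replicate (n+1).toNat 0, by simp, by simp; omega, fun j hj => ?_⟩
    simp [hjlt j hj]
  | cons u rest ih =>
    intro ord1 hsplit
    subst hsplit
    obtain ⟨r', he', hlen', hv'⟩ := ih (ord1 ++ [u]) (by simp)
    have humem : u ∈ ord1 ++ u :: rest := by simp
    have hru : reachb n par u = true := hreach u humem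
    have hub := reachb_bounds n par hn u hru
    obtain ⟨ku, hku⟩ := (reachb_iff n par u hn).1 hru
    have hvu := val_access n val u hub.1 hub.2 hval
    have htu := tree_access n par tree htree u hub.1 hub.2
    -- u sits at index ord1.length, and the part after it is rest
    have hilt : ord1.length < (ord1 ++ u :: rest).length := by simp
    have hidx : (ord1 ++ u :: rest)[ord1.length]'hilt = u := by
      rw [List.getElem_append_right (le_refl _)]
      simp
    have hdrop : (ord1 ++ u :: rest).drop (ord1.length + 1) = rest := by
      rw [List.drop_append]
      simp
    have hchsub : ∀ c ∈ childrenL n par u, c ∈ rest := by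
      intro c hc
      have := hclos ord1.length hilt c (by rwa [hidx])
      rwa [hdrop] at this
    -- each child's entry of r' is its subtree sum
    have hcget : ∀ c ∈ childrenL n par u, PySem.List.pyGet? r' c = some (Tsum n par val c) := by
      intro c hc
      obtain ⟨h2c, hcn, _⟩ := (mem_childrenL n par u c).1 hc
      have h0 : (0:Int) ≤ c := by omega
      have hlt : c < (r'.length : Int) := by rw [hlen']; omega
      rw [PySem.List.pyGet?_eq_some_getElem r' h0 hlt]
      have := hv' c.toNat (by omega)
      rw [List.getElem?_eq_getElem (by omega)] at this
      have hmem : ((c.toNat : Nat) : Int) ∈ rest := by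
        rw [show ((c.toNat : Nat) : Int) = c from by omega]
        exact hchsub c hc
      rw [if_pos hmem] at this
      have := Option.some.inj this
      rw [this, show ((c.toNat : Nat) : Int) = c from by omega]
    have hcs := childSum_spec r' (Tsum n par val) (childrenL n par u) hcget 0
    have hTu : PySem.List.pyGetD val u 0 + ((childrenL n par u).map (Tsum n par val)).sum
        = Tsum n par val u := (Tsum_dec n par val hn ku u hku).symm
    have hsetu : PySem.List.pySet? r' u (Tsum n par val u)
        = some (r'.set u.toNat (Tsum n par val u)) := by
      have h1 := PySem.List.pySet?_natCast r' u.toNat (Tsum n par val u) (by omega)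
      rwa [show ((u.toNat : Nat) : Int) = u from by omega] at h1
    have hstep : accStep tree val r' u = some (r'.set u.toNat (Tsum n par val u)) := by
      unfold accStep childSum
      rw [hvu]
      dsimp only
      rw [htu]
      dsimp only
      rw [hcs]
      dsimp only
      rw [zero_add, hTu, hsetu]
    refine ⟨r'.set u.toNat (Tsum n par val u), ?_, by simp [hlen'], fun j hj => ?_⟩
    · rw [List.reverse_cons, List.foldlM_append, he']
      simp [hstep]
    · rw [List.getElem?_set]
      by_cases hju : u.toNat = j
      · rw [if_pos hju, if_pos (by omega)]
        have hjeq : (j : Int) = u := by omega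
        rw [hjeq, if_pos (List.mem_cons_self)]
      · rw [if_neg hju, hv' j hj]
        have hjne : (j : Int) ≠ u := by omega
        have hmemiff : (j:Int) ∈ u :: rest ↔ (j:Int) ∈ rest := by
          simp [List.mem_cons, hjne]
        simp only [hmemiff]

-- the two ports compute the same per-index values
theorem entries_eq (n : Int) (par val : List Int) (hpre : Pre_subtree_sum n par val) :
    ∃ tree resA ord resB,
      List.foldlM (buildStep par) (List.replicate (n+1).toNat []) (PySem.List.pyRange 2 (n+1) 1) = some tree ∧
      dfsA tree val (n.toNat + 1) 1 (List.replicate (n+1).toNat 0) = some (resA, Tsum n par val 1) ∧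
      stackLoop tree (n.toNat + 1) [1] [] = some ord ∧
      ord.reverse.foldlM (accStep tree val) (List.replicate (n+1).toNat 0) = some resB ∧
      resA = resB := by
  have hc := ctx_of_pre n par val hpre
  have hn := hc.1
  obtain ⟨_, hparlen, hvallen, _⟩ := hpre
  obtain ⟨tree, htb, htlen, htent⟩ := buildA_spec n par hc (PySem.List.pyRange 2 (n+1) 1)
    (List.replicate (n+1).toNat []) (fun i hi => by rw [PySem.List.mem_pyRange_one] at hi; omega)
    (by rw [List.length_replicate]; omega)
  have htree : ∀ w : Nat, w < n.toNat + 1 → tree[w]? = some (childrenL n par (w:Int)) := by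
    intro w hw
    rw [htent w hw, List.getD_replicate [] (by omega)]
    simp [childrenL]
  have hpath1 : pathB n par 0 1 = true := by simp [pathB]
  obtain ⟨resA, hda, hlenA, hvA⟩ := dfsA_main n par val hc hvallen tree htree (n.toNat+1) 0 1
    (List.replicate (n+1).toNat 0) hpath1 (by rw [List.length_replicate]; omega) (by omega)
  -- run the stack DFS
  have hRlen : (Rlist n par).length ≤ n.toNat := by
    have := List.length_filter_le (fun j => reachb n par j) (PySem.List.pyRange 1 (n+1) 1)
    rw [PySem.List.length_pyRange_one] at this
    unfold Rlist
    omega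
  obtain ⟨ord, hso, hordnd, hordreach, hord1, hordclos⟩ :=
    stackLoop_spec n par hn tree htree (n.toNat + 1) [1] []
      (by simp)
      (by intro u hu; simp at hu; rw [hu]; exact reachb_one n par)
      (by simp)
      (by intro i hi; simp at hi)
      (by intro c h2 _ hcmem; simp at hcmem; omega)
      (by simp; omega)
  obtain ⟨resB, hfb, hlenB, hvB⟩ := accFold n par val hn hvallen tree htree ord
    hordreach hordclos ord [] (by simp)
  have hentries : ∀ j : Nat, j < n.toNat + 1 → resA[j]? = resB[j]? := by
    intro j hj
    rw [hvA j hj, hvB j hj]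
    rw [List.getD_replicate 0 (by omega)]
    cases hrj : reachb n par (j:Int) with
    | false =>
      have hz := Tsum_zero_of_not_reach n par val hn (j:Int) hrj
      have hnotmem : ¬ ((j:Int) ∈ ord) := by
        intro hcon
        have := hordreach (j:Int) hcon
        rw [hrj] at this
        exact Bool.noConfusion this
      rw [if_neg hnotmem]
      simp
    | true =>
      obtain ⟨kj, hkj⟩ := (reachb_iff n par (j:Int) hn).1 hrj
      have hcont : (chn n par (j:Int)).contains 1 = true := by
        rw [chn_eq n par (j:Int) kj hn hkj, List.contains_iff_mem]
        exact one_mem_pl n par kj (j:Int) hkj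
      have hmem : (j:Int) ∈ ord := reach_mem_ord n par ord hord1 hordclos kj (j:Int) hkj
      rw [hcont, if_pos hmem]
      simp
  have hlists : resA = resB := by
    apply List.ext_getElem?
    intro i
    by_cases hi : i < n.toNat + 1
    · exact hentries i hi
    · rw [List.getElem?_eq_none (by omega), List.getElem?_eq_none (by omega)]
  exact ⟨tree, resA, ord, resB, htb, hda, hso, hfb, hlists⟩

-- ===== VERDICT (by name: the statement is the Claim_ definition above) =====
theorem subtree_sum_spec : Claim_equal_subtree_sum := by
  unfold Claim_equal_subtree_sum
  intro n par val _ hpre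
  unfold Spec_subtree_sum
  obtain ⟨tree, resA, ord, resB, htb, hda, hso, hfb, hlists⟩ := entries_eq n par val hpre
  unfold subtree_sum subtree_sum_alt
  rw [htb]
  dsimp only
  rw [hda]
  dsimp only
  rw [hso]
  dsimp only
  rw [hfb]
  dsimp only
  rw [hlists]
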